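-- pv_equiv track=rewrite | github.com/HomeRad/TorCleaner | wc/http/__init__.py | split_quoted_string
-- ===== SOURCE A (Python) =====
-- def split_quoted_string (s):
--     """
--     Split off a leading quoted string.
--     """
--     if not s.startswith('"'):
--         raise ValueError("No quoted string found")
--     quoted = ""
--     i = 1
--     escape = False
--     while i < len(s):
--         if s[i] == '\\' and not escape:
--             escape = True
--             i += 1
--             continue
--         if s[i] == '"' and not escape:
--             break
--         quoted += s[i]
--         escape = False
--         i += 1
--     return (quoted, s[i+1:].lstrip())
-- ===== SOURCE B (Python) =====
-- def split_quoted_string(s):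
--     """
--     Split off a leading quoted string.
--     """
--     if not s.startswith('"'):
--         raise ValueError("No quoted string found")
--     # phase 1: find index of the unescaped closing quote (may run past len on a trailing escape)
--     n = len(s)
--     i = 1
--     while i < n and s[i] != '"':
--         i += 2 if s[i] == '\\' else 1
--     # phase 2: strip escapes from the inner text (drop each backslash, keep the next char)
--     inner = s[1:i]
--     out = []
--     j = 0
--     while j < len(inner):
--         if inner[j] == '\\':
--             j += 1
--         if j < len(inner):
--             out.append(inner[j])
--         j += 1
--     return ("".join(out), s[i+1:].lstrip())
-- ===== Notes on version B (the rewrite author's own statement) =====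
-- stated objective: alternative
-- what changed: A builds the quoted text character by character inside a single scan with an escape flag; B first locates the closing-quote index with an index-only scan (jumping 2 over escapes), then strips escapes from the inner slice in a separate pass.
import Mathlib
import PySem

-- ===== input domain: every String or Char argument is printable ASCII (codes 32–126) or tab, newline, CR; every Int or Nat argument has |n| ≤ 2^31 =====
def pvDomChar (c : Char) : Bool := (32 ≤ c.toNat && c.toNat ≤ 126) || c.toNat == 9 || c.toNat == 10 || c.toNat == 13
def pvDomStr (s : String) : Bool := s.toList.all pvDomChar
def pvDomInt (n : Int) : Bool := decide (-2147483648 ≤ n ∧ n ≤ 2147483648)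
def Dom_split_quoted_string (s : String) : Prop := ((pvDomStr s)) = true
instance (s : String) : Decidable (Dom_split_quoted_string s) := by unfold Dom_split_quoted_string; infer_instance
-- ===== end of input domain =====

-- B: two-phase rewrite — first locate the closing quote by index arithmetic alone, then strip
-- escapes from the inner slice in a second pass ('alternative' objective; same cost as A).

-- ===== PORT A =====
-- A's while loop: i, accumulated `quoted`, and the `escape` flag, step for step.
def splitALoop (cs : List Char) (i : Nat) (quoted : List Char) (escape : Bool) :
    Nat × List Char :=
  if h : i < cs.length then
    if cs[i] = '\\' ∧ ¬escape then
      splitALoop cs (i+1) quoted true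
    else if cs[i] = '"' ∧ ¬escape then
      (i, quoted)
    else
      splitALoop cs (i+1) (quoted ++ [cs[i]]) false
  else (i, quoted)
termination_by cs.length - i

def split_quoted_string (s : String) : String × String :=
  if PySem.Str.startswith s "\"" then
    let cs := s.toList
    let r := splitALoop cs 1 [] false
    (String.ofList r.2,
     String.ofList (PySem.Chars.lstrip (PySem.List.slice cs (some ((r.1 : Int) + 1)) none)))
  else ("", "")  -- A raises ValueError here; excluded by Pre_

-- ===== PORT B =====
-- phase 1: Source B's index-only scan for the closing quote (jumps 2 over an escape).
def findEnd (cs : List Char) (i : Nat) : Nat :=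
  if h : i < cs.length then
    if cs[i] = '"' then i
    else if cs[i] = '\\' then findEnd cs (i+2)
    else findEnd cs (i+1)
  else i
termination_by cs.length - i

-- phase 2: Source B's escape-stripping loop over `inner` (drop each backslash, keep the next char).
def unesc : List Char → List Char
  | [] => []
  | c :: rest =>
      if c = '\\' then
        match rest with
        | [] => []
        | d :: rest' => d :: unesc rest'
      else c :: unesc rest

def split_quoted_string_alt (s : String) : String × String :=
  if PySem.Str.startswith s "\"" then
    let cs := s.toList
    let e := findEnd cs 1
    (String.ofList (unesc (PySem.List.slice cs (some (1 : Int)) (some (e : Int)))),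
     String.ofList (PySem.Chars.lstrip (PySem.List.slice cs (some ((e : Int) + 1)) none)))
  else ("", "")  -- A raises ValueError here; excluded by Pre_

-- ===== PRECONDITION & SPEC =====
-- A raises ValueError when s does not start with '"'; exactly those inputs are excluded.
def Pre_split_quoted_string (s : String) : Prop := PySem.Str.startswith s "\"" = true
instance (s : String) : Decidable (Pre_split_quoted_string s) := by
  unfold Pre_split_quoted_string; infer_instance

def pvWitness_split_quoted_string : String := "\"a\\\"b\" rest"

def Spec_split_quoted_string (s : String) (out : String × String) : Prop := out = split_quoted_string_alt s
instance (s : String) (out : String × String) : Decidable (Spec_split_quoted_string s out) := by unfold Spec_split_quoted_string; infer_instance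

-- ===== CLAIM (what is proved, stated in full; the proofs are below) =====
def Claim_equal_split_quoted_string : Prop := ∀ (s : String), Dom_split_quoted_string s → Pre_split_quoted_string s → Spec_split_quoted_string s (split_quoted_string s)

-- ===== LEMMAS AND PROOFS =====

-- findEnd stays between i and cs.length + 1
theorem findEnd_le (cs : List Char) (i : Nat) (h : i ≤ cs.length) :
    findEnd cs i ≤ cs.length + 1 := by
  unfold findEnd
  split
  · split
    · omega
    · split
      · by_cases h2 : i + 2 ≤ cs.length
        · exact findEnd_le cs (i+2) h2
        · unfold findEnd; split <;> omega
      · exact findEnd_le cs (i+1) (by omega)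
  · omega
termination_by cs.length - i

theorem le_findEnd (cs : List Char) (i : Nat) : i ≤ findEnd cs i := by
  unfold findEnd
  split
  · split
    · omega
    · split
      · have := le_findEnd cs (i+2); omega
      · have := le_findEnd cs (i+1); omega
  · omega
termination_by cs.length - i

theorem unesc_esc (c : Char) (rest : List Char) :
    unesc ('\\' :: c :: rest) = c :: unesc rest := by
  rw [unesc.eq_def]; simp

theorem unesc_cons {c : Char} (rest : List Char) (hb : ¬ c = '\\') :
    unesc (c :: rest) = c :: unesc rest := by
  rw [unesc.eq_def]; simp [hb]

-- the key invariant: A's loop (from an unescaped state) = (clamped end index, q ++ stripped segment)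
theorem loopA_eq (cs : List Char) (i : Nat) (q : List Char) (hle : i ≤ cs.length) :
    splitALoop cs i q false =
      (min (findEnd cs i) cs.length,
       q ++ unesc ((cs.drop i).take (findEnd cs i - i))) := by
  by_cases h : i < cs.length
  · by_cases hb : cs[i] = '\\'
    · have hdrop : cs.drop i = '\\' :: cs.drop (i+1) := by
        rw [List.drop_eq_getElem_cons h, hb]
      by_cases h2 : i + 1 < cs.length
      · -- escape step, then the escaped char is consumed
        have hdrop2 : cs.drop (i+1) = cs[i+1] :: cs.drop (i+2) :=
          List.drop_eq_getElem_cons h2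
        have hrec := loopA_eq cs (i+2) (q ++ [cs[i+1]]) (by omega)
        have hA : splitALoop cs i q false = splitALoop cs (i+2) (q ++ [cs[i+1]]) false := by
          rw [splitALoop]; simp [h, hb]
          rw [splitALoop]; simp [h2, show i+1+1 = i+2 from rfl]
        have hF : findEnd cs i = findEnd cs (i+2) := by
          rw [findEnd]; simp [h, hb]
        have hfe2 := le_findEnd cs (i+2)
        rw [hA, hF, hrec, Prod.mk.injEq]
        refine ⟨rfl, ?_⟩
        rw [hdrop, hdrop2]
        have ht : findEnd cs (i+2) - i = (findEnd cs (i+2) - (i+2)) + 2 := by omega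
        rw [ht]
        simp only [List.take_succ_cons, unesc_esc]
        simp
      · -- trailing backslash: A stops at i+1 = cs.length; findEnd jumps to i+2
        have hA : splitALoop cs i q false = (i+1, q) := by
          rw [splitALoop]; simp [h, hb]
          rw [splitALoop]; simp [h2]
        have hF : findEnd cs i = i + 2 := by
          rw [findEnd]; simp [h, hb]
          rw [findEnd]; simp [show ¬ i + 2 < cs.length by omega]
        rw [hA, hF, hdrop, Prod.mk.injEq]
        refine ⟨by omega, ?_⟩
        rw [List.drop_eq_nil_of_le (by omega : cs.length ≤ i + 1)]
        simp [unesc]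
    · by_cases hq : cs[i] = '"'
      · have hA : splitALoop cs i q false = (i, q) := by
          rw [splitALoop]; simp [h, hq]
        have hF : findEnd cs i = i := by
          rw [findEnd]; simp [h, hq]
        rw [hA, hF]
        simp [unesc, Nat.le_of_lt h]
      · have hrec := loopA_eq cs (i+1) (q ++ [cs[i]]) (by omega)
        have hdrop : cs.drop i = cs[i] :: cs.drop (i+1) := List.drop_eq_getElem_cons h
        have hA : splitALoop cs i q false = splitALoop cs (i+1) (q ++ [cs[i]]) false := by
          rw [splitALoop]; simp [h, hb, hq]
        have hF : findEnd cs i = findEnd cs (i+1) := by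
          rw [findEnd]; simp [h, hb, hq]
        have hfe := le_findEnd cs (i+1)
        rw [hA, hF, hrec, hdrop, Prod.mk.injEq]
        refine ⟨rfl, ?_⟩
        have ht : findEnd cs (i+1) - i = (findEnd cs (i+1) - (i+1)) + 1 := by omega
        rw [ht, List.take_succ_cons, unesc_cons _ hb]
        simp
  · have hA : splitALoop cs i q false = (i, q) := by rw [splitALoop]; simp [h]
    have hF : findEnd cs i = i := by rw [findEnd]; simp [h]
    rw [hA, hF]
    simp [show i = cs.length by omega, unesc]
termination_by cs.length - i

theorem split_quoted_string_spec : Claim_equal_split_quoted_string := by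
  intro s _ hpre
  rw [Pre_split_quoted_string] at hpre
  unfold Spec_split_quoted_string split_quoted_string split_quoted_string_alt
  rw [if_pos hpre, if_pos hpre]
  have h1 : 1 ≤ s.toList.length := by
    have hp := (PySem.Chars.startswith_iff (s := s.toList) (p := "\"".toList)).1
      (by simpa using hpre)
    simpa using hp.length_le
  have hkey := loopA_eq s.toList 1 [] h1
  have hle := findEnd_le s.toList 1 h1
  have hge := le_findEnd s.toList 1
  set e := findEnd s.toList 1 with he
  simp only [hkey, List.nil_append, Prod.mk.injEq]
  rw [← he]
  have hdropeq : s.toList.drop (min e s.toList.length + 1) = s.toList.drop (e + 1) := by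
    by_cases hc : e ≤ s.toList.length
    · rw [Nat.min_eq_left hc]
    · rw [List.drop_eq_nil_of_le (by omega), List.drop_eq_nil_of_le (by omega)]
  refine ⟨?_, ?_⟩
  · -- quoted parts agree
    congr 1
    rw [PySem.List.slice_toNat _ (by norm_num) (by positivity)]
    simp
  · -- remainders agree: drop (min e len + 1) = drop (e + 1)
    rw [show ((min e s.toList.length : Nat) : Int) + 1 = ((min e s.toList.length + 1 : Nat) : Int) by push_cast; ring,
        show ((e : Nat) : Int) + 1 = ((e + 1 : Nat) : Int) by push_cast; ring,
        PySem.List.slice_from_natCast, PySem.List.slice_from_natCast, hdropeq]
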